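-- pv_equiv track=rewrite | github.com/cdeust/Cortex | mcp_server/core/codebase_graph.py | compute_impact
-- ===== SOURCE A (Python) =====
-- def compute_impact(
--     target_file: str,
--     file_edges: list[tuple[str, str]],
--     call_edges: list[tuple[str, str, str]],
--     max_depth: int = 3,
-- ) -> dict[str, list[str]]:
--     """Compute blast radius: what depends on target_file.
--
--     Args:
--         target_file: The file being changed.
--         file_edges: (source, target) import edges.
--         call_edges: (caller, symbol, target) call edges.
--         max_depth: Maximum traversal depth.
--
--     Returns:
--         Dict with "upstream" and "downstream" file lists.
--     """
--     # Build adjacency lists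
--     dependents: dict[str, set[str]] = {}  # target → who imports it
--     dependencies: dict[str, set[str]] = {}  # source → what it imports
--
--     for src, tgt in file_edges:
--         dependents.setdefault(tgt, set()).add(src)
--         dependencies.setdefault(src, set()).add(tgt)
--     for src, _, tgt in call_edges:
--         dependents.setdefault(tgt, set()).add(src)
--         dependencies.setdefault(src, set()).add(tgt)
--
--     upstream = _bfs(target_file, dependents, max_depth)
--     downstream = _bfs(target_file, dependencies, max_depth)
--
--     return {
--         "upstream": sorted(upstream - {target_file}),
--         "downstream": sorted(downstream - {target_file}),
--     }
--
-- def _bfs(start: str, adj: dict[str, set[str]], max_depth: int) -> set[str]: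
--     """Breadth-first traversal up to max_depth."""
--     visited: set[str] = {start}
--     frontier = [start]
--     for _ in range(max_depth):
--         next_frontier: list[str] = []
--         for node in frontier:
--             for neighbor in adj.get(node, set()):
--                 if neighbor not in visited:
--                     visited.add(neighbor)
--                     next_frontier.append(neighbor)
--         frontier = next_frontier
--         if not frontier:
--             break
--     return visited
-- ===== SOURCE B (Python) =====
-- def compute_impact(
--     target_file: str,
--     file_edges: list[tuple[str, str]],
--     call_edges: list[tuple[str, str, str]],
--     max_depth: int = 3,
-- ) -> dict[str, list[str]]:
--     """Blast radius via bounded fixpoint relaxation over the edge list (no adjacency dicts, no frontier)."""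
--     edges = list(file_edges) + [(s, t) for (s, _, t) in call_edges]
--
--     def reach(oriented: list[tuple[str, str]]) -> set[str]:
--         reached = {target_file}
--         for _ in range(max_depth):
--             new = {v for (u, v) in oriented if u in reached} - reached
--             if not new:
--                 break
--             reached |= new
--         return reached
--
--     upstream = reach([(t, s) for (s, t) in edges])
--     downstream = reach(edges)
--     return {
--         "upstream": sorted(upstream - {target_file}),
--         "downstream": sorted(downstream - {target_file}),
--     }
-- ===== Notes on version B (the rewrite author's own statement) =====
-- stated objective: alternative
-- what changed: B drops A's adjacency-dict construction and two frontier-based BFS traversals, instead computing depth-bounded reachability by fixpoint relaxation: it repeatedly scans the raw edge list (once per depth level, in each direction), unioning in neighbours of already-reached nodes and stopping when the set stops growing.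
import Mathlib
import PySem

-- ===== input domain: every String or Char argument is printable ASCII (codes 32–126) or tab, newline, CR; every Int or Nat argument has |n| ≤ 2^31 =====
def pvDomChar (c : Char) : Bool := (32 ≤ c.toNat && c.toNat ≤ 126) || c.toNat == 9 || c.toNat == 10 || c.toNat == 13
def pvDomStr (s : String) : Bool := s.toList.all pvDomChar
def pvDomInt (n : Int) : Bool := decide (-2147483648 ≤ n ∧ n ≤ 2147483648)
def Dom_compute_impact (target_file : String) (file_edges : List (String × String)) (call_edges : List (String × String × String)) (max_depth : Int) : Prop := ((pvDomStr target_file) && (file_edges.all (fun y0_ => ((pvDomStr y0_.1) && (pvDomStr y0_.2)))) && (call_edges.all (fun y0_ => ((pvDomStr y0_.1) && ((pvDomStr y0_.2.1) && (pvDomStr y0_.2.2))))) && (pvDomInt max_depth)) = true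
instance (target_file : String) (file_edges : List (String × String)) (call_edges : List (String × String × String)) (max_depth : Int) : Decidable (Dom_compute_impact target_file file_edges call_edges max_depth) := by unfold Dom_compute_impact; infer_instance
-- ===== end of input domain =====

-- B replaces A's two frontier-BFS traversals over adjacency dicts by a bounded fixpoint
-- relaxation directly over the edge list (no adjacency dicts, no frontier); objective: simpler.

-- ===== PORT A =====
-- `dependents.setdefault(tgt, set()).add(src)` / `dependencies.setdefault(src, set()).add(tgt)`
def pvAddEdge (d : PySem.Dict String (PySem.Set String) × PySem.Dict String (PySem.Set String))
    (src tgt : String) :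
    PySem.Dict String (PySem.Set String) × PySem.Dict String (PySem.Set String) :=
  (d.1.modify tgt PySem.Set.empty (fun v => PySem.Set.add v src),
   d.2.modify src PySem.Set.empty (fun v => PySem.Set.add v tgt))

-- body of `for node in frontier: for neighbor in adj.get(node, set()): …`
def pvBfsNode (adj : PySem.Dict String (PySem.Set String))
    (st : PySem.Set String × List String) (node : String) :
    PySem.Set String × List String :=
  (adj.getD node PySem.Set.empty).foldl
    (fun st2 neighbor =>
      if PySem.Set.contains st2.1 neighbor then st2
      else (PySem.Set.add st2.1 neighbor, st2.2 ++ [neighbor]))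
    st

-- `for _ in range(max_depth): … ; frontier = next_frontier ; if not frontier: break`
def pvBfsLoop (adj : PySem.Dict String (PySem.Set String)) :
    Nat → PySem.Set String → List String → PySem.Set String
  | 0, visited, _ => visited
  | Nat.succ n, visited, frontier =>
    let st := frontier.foldl (pvBfsNode adj) (visited, [])
    if st.2.isEmpty then st.1 else pvBfsLoop adj n st.1 st.2

-- `_bfs(start, adj, max_depth)`
def pv_bfs (start : String) (adj : PySem.Dict String (PySem.Set String)) (max_depth : Int) :
    PySem.Set String :=
  pvBfsLoop adj max_depth.toNat (PySem.Set.ofList [start]) [start]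

def compute_impact (target_file : String) (file_edges : List (String × String)) (call_edges : List (String × String × String)) (max_depth : Int) : List (String × List String) :=
  let d0 : PySem.Dict String (PySem.Set String) × PySem.Dict String (PySem.Set String) :=
    (PySem.Dict.empty, PySem.Dict.empty)
  let d1 := file_edges.foldl (fun d e => pvAddEdge d e.1 e.2) d0
  let d2 := call_edges.foldl (fun d e => pvAddEdge d e.1 e.2.2) d1
  let upstream := pv_bfs target_file d2.1 max_depth
  let downstream := pv_bfs target_file d2.2 max_depth
  [("upstream",
      PySem.List.sorted (PySem.Set.diff upstream (PySem.Set.ofList [target_file])) (fun x => x) false),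
   ("downstream",
      PySem.List.sorted (PySem.Set.diff downstream (PySem.Set.ofList [target_file])) (fun x => x) false)]

-- ===== PORT B =====
-- `new = {v for (u, v) in oriented if u in reached} - reached; if not new: break; reached |= new`
def pvRelaxLoop (oriented : List (String × String)) :
    Nat → PySem.Set String → PySem.Set String
  | 0, reached => reached
  | Nat.succ n, reached =>
    let new := PySem.Set.diff
      (PySem.Set.ofList (((oriented.filter (fun e => PySem.Set.contains reached e.1)).map (fun e => e.2))))
      reached
    if new.isEmpty then reached else pvRelaxLoop oriented n (PySem.Set.union reached new)

def compute_impact_alt (target_file : String) (file_edges : List (String × String)) (call_edges : List (String × String × String)) (max_depth : Int) : List (String × List String) :=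
  let edges := file_edges ++ call_edges.map (fun e => (e.1, e.2.2))
  let upstream := pvRelaxLoop (edges.map (fun e => (e.2, e.1))) max_depth.toNat
    (PySem.Set.ofList [target_file])
  let downstream := pvRelaxLoop edges max_depth.toNat (PySem.Set.ofList [target_file])
  [("upstream",
      PySem.List.sorted (PySem.Set.diff upstream (PySem.Set.ofList [target_file])) (fun x => x) false),
   ("downstream",
      PySem.List.sorted (PySem.Set.diff downstream (PySem.Set.ofList [target_file])) (fun x => x) false)]

-- ===== PRECONDITION & SPEC =====
def Spec_compute_impact (target_file : String) (file_edges : List (String × String)) (call_edges : List (String × String × String)) (max_depth : Int) (out : List (String × List String)) : Prop := out = compute_impact_alt target_file file_edges call_edges max_depth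
instance (target_file : String) (file_edges : List (String × String)) (call_edges : List (String × String × String)) (max_depth : Int) (out : List (String × List String)) : Decidable (Spec_compute_impact target_file file_edges call_edges max_depth out) := by unfold Spec_compute_impact; infer_instance

-- ===== CLAIM (what is proved, stated in full; the proofs are below) =====
def Claim_equal_compute_impact : Prop := ∀ (target_file : String) (file_edges : List (String × String)) (call_edges : List (String × String × String)) (max_depth : Int), Dom_compute_impact target_file file_edges call_edges max_depth → Spec_compute_impact target_file file_edges call_edges max_depth (compute_impact target_file file_edges call_edges max_depth)

-- ===== LEMMAS AND PROOFS =====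

-- one abstract "expand by one level" step on membership predicates; `nb u x` = x is a neighbour of u
def pvStep (nb : String → String → Prop) (S : String → Prop) : String → Prop :=
  fun x => S x ∨ ∃ u, S u ∧ nb u x

theorem pvStep_congr {nb nb' : String → String → Prop} {S T : String → Prop}
    (hnb : ∀ u x, nb u x ↔ nb' u x) (h : ∀ y, S y ↔ T y) (x : String) :
    pvStep nb S x ↔ pvStep nb' T x := by
  simp only [pvStep]
  constructor
  · rintro (hx | ⟨u, hu, hnx⟩)
    · exact Or.inl ((h x).1 hx)
    · exact Or.inr ⟨u, (h u).1 hu, (hnb u x).1 hnx⟩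
  · rintro (hx | ⟨u, hu, hnx⟩)
    · exact Or.inl ((h x).2 hx)
    · exact Or.inr ⟨u, (h u).2 hu, (hnb u x).2 hnx⟩

theorem pvStep_iter_congr {nb nb' : String → String → Prop} {S T : String → Prop}
    (hnb : ∀ u x, nb u x ↔ nb' u x) (h : ∀ y, S y ↔ T y) :
    ∀ (n : Nat) (x : String), (pvStep nb)^[n] S x ↔ (pvStep nb')^[n] T x := by
  intro n
  induction n generalizing S T with
  | zero => simpa using h
  | succ n ih =>
    intro x
    rw [Function.iterate_succ_apply, Function.iterate_succ_apply]
    exact ih (fun y => pvStep_congr hnb h y) x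

-- once the reached set is closed under edges, further rounds change nothing
theorem pvStep_iter_fix {nb : String → String → Prop} {S : String → Prop}
    (hcl : ∀ u x, S u → nb u x → S x) :
    ∀ (n : Nat) (x : String), (pvStep nb)^[n] S x ↔ S x := by
  intro n
  induction n with
  | zero => simp
  | succ n ih =>
    intro x
    rw [Function.iterate_succ_apply]
    have hstep : ∀ y, pvStep nb S y ↔ S y := by
      intro y
      constructor
      · rintro (hy | ⟨u, hu, hny⟩)
        · exact hy
        · exact hcl u y hu hny
      · exact fun hy => Or.inl hy
    exact Iff.trans (pvStep_iter_congr (fun _ _ => Iff.rfl) hstep n x) (ih x)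

-- ---------- A side: characterising the adjacency-building fold ----------
theorem pvBuild_mem {α : Type} (k v : α → String) :
    ∀ (es : List α) (d : PySem.Dict String (PySem.Set String)) (u x : String),
      x ∈ (es.foldl (fun d e => d.modify (k e) PySem.Set.empty (fun s => PySem.Set.add s (v e))) d).getD u PySem.Set.empty
        ↔ x ∈ d.getD u PySem.Set.empty ∨ ∃ e ∈ es, k e = u ∧ v e = x := by
  intro es
  induction es with
  | nil => simp
  | cons e es ih =>
    intro d u x
    rw [List.foldl_cons, ih, PySem.Dict.getD_modify]
    by_cases hu : u = k e
    · subst hu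
      rw [if_pos rfl, PySem.Set.mem_add]
      constructor
      · rintro ((h | h) | h)
        · exact Or.inl h
        · exact Or.inr ⟨e, by simp, rfl, h.symm⟩
        · rcases h with ⟨e', he', hk, hv⟩
          exact Or.inr ⟨e', by simp [he'], hk, hv⟩
      · rintro (h | ⟨e', he', hk, hv⟩)
        · exact Or.inl (Or.inl h)
        · rcases List.mem_cons.1 he' with rfl | he'
          · exact Or.inl (Or.inr hv.symm)
          · exact Or.inr ⟨e', he', hk, hv⟩
    · rw [if_neg hu]
      constructor
      · rintro (h | ⟨e', he', hk, hv⟩)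
        · exact Or.inl h
        · exact Or.inr ⟨e', by simp [he'], hk, hv⟩
      · rintro (h | ⟨e', he', hk, hv⟩)
        · exact Or.inl h
        · rcases List.mem_cons.1 he' with rfl | he'
          · exact absurd hk.symm hu
          · exact Or.inr ⟨e', he', hk, hv⟩

-- projecting the paired fold to its components
theorem pvAddEdge_fold_fst {α : Type} (k v : α → String) (es : List α) :
    ∀ (d : PySem.Dict String (PySem.Set String) × PySem.Dict String (PySem.Set String)),
      (es.foldl (fun d e => pvAddEdge d (k e) (v e)) d).1
        = es.foldl (fun d e => d.modify (v e) PySem.Set.empty (fun s => PySem.Set.add s (k e))) d.1 := by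
  induction es with
  | nil => intro d; rfl
  | cons e es ih => intro d; rw [List.foldl_cons, List.foldl_cons, ih]; rfl

theorem pvAddEdge_fold_snd {α : Type} (k v : α → String) (es : List α) :
    ∀ (d : PySem.Dict String (PySem.Set String) × PySem.Dict String (PySem.Set String)),
      (es.foldl (fun d e => pvAddEdge d (k e) (v e)) d).2
        = es.foldl (fun d e => d.modify (k e) PySem.Set.empty (fun s => PySem.Set.add s (v e))) d.2 := by
  induction es with
  | nil => intro d; rfl
  | cons e es ih => intro d; rw [List.foldl_cons, List.foldl_cons, ih]; rfl

-- ---------- A side: one BFS round (the double fold) ----------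
theorem pvBfsInner_fold :
    ∀ (l : List String) (vis : PySem.Set String) (acc : List String),
      ∃ fresh : List String,
        l.foldl (fun st2 y => if PySem.Set.contains st2.1 y then st2
            else (PySem.Set.add st2.1 y, st2.2 ++ [y])) (vis, acc)
          = (vis ++ fresh, acc ++ fresh) ∧
        (∀ x ∈ fresh, x ∈ l ∧ x ∉ vis) ∧
        (∀ x ∈ l, x ∈ vis ++ fresh) ∧ fresh.Nodup := by
  intro l
  induction l with
  | nil => intro vis acc; exact ⟨[], by simp, by simp, by simp, List.nodup_nil⟩
  | cons y l ih =>
    intro vis acc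
    by_cases hy : PySem.Set.contains vis y = true
    · obtain ⟨fresh, heq, hf, hcov, hnd⟩ := ih vis acc
      have hyv : y ∈ vis := (PySem.Set.contains_iff vis y).1 hy
      refine ⟨fresh, ?_, ?_, ?_, hnd⟩
      · rw [List.foldl_cons, if_pos hy]; exact heq
      · exact fun x hx => ⟨List.mem_cons_of_mem _ (hf x hx).1, (hf x hx).2⟩
      · intro x hx
        rcases List.mem_cons.1 hx with rfl | hx
        · exact List.mem_append.2 (Or.inl hyv)
        · exact hcov x hx
    · have hyv : y ∉ vis := fun hm => hy ((PySem.Set.contains_iff vis y).2 hm)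
      have hadd : PySem.Set.add vis y = vis ++ [y] := by
        simp [PySem.Set.add, hyv]
      obtain ⟨fresh, heq, hf, hcov, hnd⟩ := ih (vis ++ [y]) (acc ++ [y])
      refine ⟨y :: fresh, ?_, ?_, ?_, ?_⟩
      · rw [List.foldl_cons, if_neg hy, hadd, heq]
        simp
      · intro x hx
        rcases List.mem_cons.1 hx with rfl | hx
        · exact ⟨List.mem_cons_self, hyv⟩
        · refine ⟨List.mem_cons_of_mem _ (hf x hx).1, fun hv => (hf x hx).2 ?_⟩
          exact List.mem_append.2 (Or.inl hv)
      · intro x hx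
        rcases List.mem_cons.1 hx with rfl | hx
        · simp
        · have := hcov x hx
          simp only [List.append_assoc, List.singleton_append] at this ⊢
          exact this
      · refine List.nodup_cons.2 ⟨fun hyf => (hf y hyf).2 (by simp), hnd⟩

theorem pvBfsNode_fold (adj : PySem.Dict String (PySem.Set String)) :
    ∀ (frontier : List String) (vis : PySem.Set String) (acc : List String),
      ∃ fresh : List String,
        frontier.foldl (pvBfsNode adj) (vis, acc) = (vis ++ fresh, acc ++ fresh) ∧
        (∀ x ∈ fresh, (∃ u ∈ frontier, x ∈ adj.getD u PySem.Set.empty) ∧ x ∉ vis) ∧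
        (∀ u ∈ frontier, ∀ x ∈ adj.getD u PySem.Set.empty, x ∈ vis ++ fresh) ∧
        fresh.Nodup := by
  intro frontier
  induction frontier with
  | nil => intro vis acc; exact ⟨[], by simp, by simp, by simp, List.nodup_nil⟩
  | cons node rest ih =>
    intro vis acc
    obtain ⟨f1, heq1, hf1, hcov1, hnd1⟩ := pvBfsInner_fold (adj.getD node PySem.Set.empty) vis acc
    obtain ⟨f2, heq2, hf2, hcov2, hnd2⟩ := ih (vis ++ f1) (acc ++ f1)
    refine ⟨f1 ++ f2, ?_, ?_, ?_, ?_⟩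
    · rw [List.foldl_cons]
      have h1 : pvBfsNode adj (vis, acc) node = (vis ++ f1, acc ++ f1) := heq1
      rw [h1, heq2]
      simp [List.append_assoc]
    · intro x hx
      rcases List.mem_append.1 hx with hx | hx
      · exact ⟨⟨node, List.mem_cons_self, (hf1 x hx).1⟩, (hf1 x hx).2⟩
      · refine ⟨?_, fun hv => (hf2 x hx).2 (List.mem_append.2 (Or.inl hv))⟩
        obtain ⟨u, hu, hxu⟩ := (hf2 x hx).1
        exact ⟨u, List.mem_cons_of_mem _ hu, hxu⟩
    · intro u hu x hxu
      rcases List.mem_cons.1 hu with rfl | hu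
      · rcases List.mem_append.1 (hcov1 x hxu) with h | h
        · exact List.mem_append.2 (Or.inl h)
        · exact List.mem_append.2 (Or.inr (List.mem_append.2 (Or.inl h)))
      · have := hcov2 u hu x hxu
        simp only [List.append_assoc] at this ⊢
        exact this
    · refine List.Nodup.append hnd1 hnd2 ?_
      intro x hx1 hx2
      exact (hf2 x hx2).2 (List.mem_append.2 (Or.inr hx1))

-- ---------- A side: the BFS loop computes iterated expansion ----------
theorem pvBfsLoop_spec (adj : PySem.Dict String (PySem.Set String)) :
    ∀ (n : Nat) (vis : PySem.Set String) (frontier : List String),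
      vis.Nodup →
      (∀ x ∈ frontier, x ∈ vis) →
      (∀ u ∈ vis, u ∉ frontier → ∀ x ∈ adj.getD u PySem.Set.empty, x ∈ vis) →
      (pvBfsLoop adj n vis frontier).Nodup ∧
      (∀ x, x ∈ pvBfsLoop adj n vis frontier ↔
        (pvStep (fun u y => y ∈ adj.getD u PySem.Set.empty))^[n] (· ∈ vis) x) := by
  intro n
  induction n with
  | zero =>
    intro vis frontier hnd _ _
    exact ⟨hnd, fun x => by simp [pvBfsLoop]⟩
  | succ n ih =>
    intro vis frontier hnd hfv hcl
    obtain ⟨fresh, heq, hf, hcov, hndf⟩ := pvBfsNode_fold adj frontier vis []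
    have hK1 : ∀ x, x ∈ vis ++ fresh ↔
        pvStep (fun u y => y ∈ adj.getD u PySem.Set.empty) (· ∈ vis) x := by
      intro x
      constructor
      · intro hx
        rcases List.mem_append.1 hx with hx | hx
        · exact Or.inl hx
        · obtain ⟨⟨u, hu, hxu⟩, _⟩ := hf x hx
          exact Or.inr ⟨u, hfv u hu, hxu⟩
      · rintro (hx | ⟨u, hu, hxu⟩)
        · exact List.mem_append.2 (Or.inl hx)
        · by_cases hufr : u ∈ frontier
          · exact hcov u hufr x hxu
          · exact List.mem_append.2 (Or.inl (hcl u hu hufr x hxu))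
    have hK2 : (vis ++ fresh).Nodup := by
      refine List.Nodup.append hnd hndf ?_
      intro x hx1 hx2
      exact (hf x hx2).2 hx1
    have hloop : pvBfsLoop adj (n + 1) vis frontier =
        if fresh.isEmpty then vis ++ fresh else pvBfsLoop adj n (vis ++ fresh) fresh := by
      show (if (frontier.foldl (pvBfsNode adj) (vis, [])).2.isEmpty
            then (frontier.foldl (pvBfsNode adj) (vis, [])).1
            else pvBfsLoop adj n (frontier.foldl (pvBfsNode adj) (vis, [])).1
              (frontier.foldl (pvBfsNode adj) (vis, [])).2) = _
      rw [heq]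
      simp
    by_cases hemp : fresh.isEmpty
    · have hfe : fresh = [] := List.isEmpty_iff.1 hemp
      subst hfe
      rw [hloop, if_pos hemp]
      simp only [List.append_nil]
      refine ⟨hnd, fun x => ?_⟩
      have hclosed : ∀ u y, u ∈ vis → y ∈ adj.getD u PySem.Set.empty → y ∈ vis := by
        intro u y hu hy
        have := (hK1 y).2 (Or.inr ⟨u, hu, hy⟩)
        simpa using this
      exact Iff.symm (Iff.trans (Iff.of_eq rfl) ((pvStep_iter_fix hclosed (n + 1) x)))
    · rw [hloop, if_neg hemp]
      have hsub : ∀ x ∈ fresh, x ∈ vis ++ fresh := fun x hx => List.mem_append.2 (Or.inr hx)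
      have hcl' : ∀ u ∈ vis ++ fresh, u ∉ fresh →
          ∀ x ∈ adj.getD u PySem.Set.empty, x ∈ vis ++ fresh := by
        intro u hu hufresh x hxu
        have huv : u ∈ vis := by
          rcases List.mem_append.1 hu with h | h
          · exact h
          · exact absurd h hufresh
        by_cases hufr : u ∈ frontier
        · exact hcov u hufr x hxu
        · exact List.mem_append.2 (Or.inl (hcl u huv hufr x hxu))
      obtain ⟨hnd', hmem'⟩ := ih (vis ++ fresh) fresh hK2 hsub hcl'
      refine ⟨hnd', fun x => ?_⟩
      rw [hmem' x, Function.iterate_succ_apply]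
      exact pvStep_iter_congr (fun _ _ => Iff.rfl) hK1 n x

-- ---------- B side: the relaxation loop computes iterated expansion ----------
theorem pvRelaxLoop_spec (oriented : List (String × String)) :
    ∀ (n : Nat) (reached : PySem.Set String),
      reached.Nodup →
      (pvRelaxLoop oriented n reached).Nodup ∧
      (∀ x, x ∈ pvRelaxLoop oriented n reached ↔
        (pvStep (fun u y => (u, y) ∈ oriented))^[n] (· ∈ reached) x) := by
  intro n
  induction n with
  | zero =>
    intro reached hnd
    exact ⟨hnd, fun x => by simp [pvRelaxLoop]⟩
  | succ n ih =>
    intro reached hnd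
    have hmemnew : ∀ x, x ∈ PySem.Set.diff
        (PySem.Set.ofList (((oriented.filter (fun e => PySem.Set.contains reached e.1)).map (fun e => e.2)))) reached
        ↔ ((∃ u, u ∈ reached ∧ (u, x) ∈ oriented) ∧ x ∉ reached) := by
      intro x
      rw [PySem.Set.mem_diff, PySem.Set.mem_ofList]
      simp only [List.mem_map, List.mem_filter]
      constructor
      · rintro ⟨⟨e, ⟨heo, hec⟩, rfl⟩, hnx⟩
        exact ⟨⟨e.1, (PySem.Set.contains_iff _ _).1 hec, heo⟩, hnx⟩
      · rintro ⟨⟨u, hur, huo⟩, hnx⟩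
        exact ⟨⟨(u, x), ⟨huo, (PySem.Set.contains_iff _ _).2 hur⟩, rfl⟩, hnx⟩
    set new := PySem.Set.diff
      (PySem.Set.ofList (((oriented.filter (fun e => PySem.Set.contains reached e.1)).map (fun e => e.2)))) reached with hnew
    have hloop : pvRelaxLoop oriented (n + 1) reached =
        if new.isEmpty then reached else pvRelaxLoop oriented n (PySem.Set.union reached new) := rfl
    by_cases hemp : new.isEmpty
    · have hne : new = [] := List.isEmpty_iff.1 hemp
      rw [hloop, if_pos hemp]
      refine ⟨hnd, fun x => ?_⟩
      have hclosed : ∀ u y, u ∈ reached → (u, y) ∈ oriented → y ∈ reached := by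
        intro u y hu huo
        by_contra hny
        have : y ∈ new := (hmemnew y).2 ⟨⟨u, hu, huo⟩, hny⟩
        rw [hne] at this
        exact absurd this (List.not_mem_nil)
      exact (pvStep_iter_fix hclosed (n + 1) x).symm
    · rw [hloop, if_neg hemp]
      have hK1 : ∀ x, x ∈ PySem.Set.union reached new ↔
          pvStep (fun u y => (u, y) ∈ oriented) (· ∈ reached) x := by
        intro x
        rw [PySem.Set.mem_union]
        constructor
        · rintro (hx | hx)
          · exact Or.inl hx
          · obtain ⟨⟨u, hu, huo⟩, _⟩ := (hmemnew x).1 hx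
            exact Or.inr ⟨u, hu, huo⟩
        · rintro (hx | ⟨u, hu, huo⟩)
          · exact Or.inl hx
          · by_cases hxr : x ∈ reached
            · exact Or.inl hxr
            · exact Or.inr ((hmemnew x).2 ⟨⟨u, hu, huo⟩, hxr⟩)
      obtain ⟨hnd', hmem'⟩ := ih (PySem.Set.union reached new) (PySem.Set.nodup_union _ _ hnd)
      refine ⟨hnd', fun x => ?_⟩
      rw [hmem' x, Function.iterate_succ_apply]
      exact pvStep_iter_congr (fun _ _ => Iff.rfl) hK1 n x

-- ---------- assembling the two sides ----------
theorem pv_main (t : String) (fe : List (String × String))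
    (ce : List (String × String × String)) (md : Int) :
    compute_impact t fe ce md = compute_impact_alt t fe ce md := by
  -- the combined edge list B iterates over
  have hA1 : ∀ u x, x ∈ (ce.foldl (fun d e => pvAddEdge d e.1 e.2.2)
      (fe.foldl (fun d e => pvAddEdge d e.1 e.2)
        ((PySem.Dict.empty, PySem.Dict.empty) :
          PySem.Dict String (PySem.Set String) × PySem.Dict String (PySem.Set String)))).1.getD u PySem.Set.empty
      ↔ (x, u) ∈ fe ++ ce.map (fun e => (e.1, e.2.2)) := by
    intro u x
    have h2 := pvAddEdge_fold_fst (fun e : String × String × String => e.1) (fun e => e.2.2) ce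
      (fe.foldl (fun d e => pvAddEdge d e.1 e.2)
        ((PySem.Dict.empty, PySem.Dict.empty) :
          PySem.Dict String (PySem.Set String) × PySem.Dict String (PySem.Set String)))
    have h1 := pvAddEdge_fold_fst (fun e : String × String => e.1) (fun e => e.2) fe
      ((PySem.Dict.empty, PySem.Dict.empty) :
        PySem.Dict String (PySem.Set String) × PySem.Dict String (PySem.Set String))
    rw [h2, pvBuild_mem, h1, pvBuild_mem]
    rw [PySem.Dict.getD_empty]
    simp only [PySem.Set.empty, List.not_mem_nil, false_or, List.mem_append, List.mem_map]
    constructor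
    · rintro (⟨e, he, hk, hv⟩ | ⟨e, he, hk, hv⟩)
      · exact Or.inl (by rw [← hk, ← hv]; exact he)
      · exact Or.inr ⟨e, he, by rw [hk, hv]⟩
    · rintro (h | ⟨e, he, heq⟩)
      · exact Or.inl ⟨(x, u), h, rfl, rfl⟩
      · have hx := congrArg Prod.fst heq
        have hu := congrArg Prod.snd heq
        simp only [] at hx hu
        exact Or.inr ⟨e, he, hu, hx⟩
  have hA2 : ∀ u x, x ∈ (ce.foldl (fun d e => pvAddEdge d e.1 e.2.2)
      (fe.foldl (fun d e => pvAddEdge d e.1 e.2)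
        ((PySem.Dict.empty, PySem.Dict.empty) :
          PySem.Dict String (PySem.Set String) × PySem.Dict String (PySem.Set String)))).2.getD u PySem.Set.empty
      ↔ (u, x) ∈ fe ++ ce.map (fun e => (e.1, e.2.2)) := by
    intro u x
    have h2 := pvAddEdge_fold_snd (fun e : String × String × String => e.1) (fun e => e.2.2) ce
      (fe.foldl (fun d e => pvAddEdge d e.1 e.2)
        ((PySem.Dict.empty, PySem.Dict.empty) :
          PySem.Dict String (PySem.Set String) × PySem.Dict String (PySem.Set String)))
    have h1 := pvAddEdge_fold_snd (fun e : String × String => e.1) (fun e => e.2) fe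
      ((PySem.Dict.empty, PySem.Dict.empty) :
        PySem.Dict String (PySem.Set String) × PySem.Dict String (PySem.Set String))
    rw [h2, pvBuild_mem, h1, pvBuild_mem]
    rw [PySem.Dict.getD_empty]
    simp only [PySem.Set.empty, List.not_mem_nil, false_or, List.mem_append, List.mem_map]
    constructor
    · rintro (⟨e, he, hk, hv⟩ | ⟨e, he, hk, hv⟩)
      · exact Or.inl (by rw [← hk, ← hv]; exact he)
      · exact Or.inr ⟨e, he, by rw [hk, hv]⟩
    · rintro (h | ⟨e, he, heq⟩)
      · exact Or.inl ⟨(u, x), h, rfl, rfl⟩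
      · have hu := congrArg Prod.fst heq
        have hx := congrArg Prod.snd heq
        simp only [] at hu hx
        exact Or.inr ⟨e, he, hu, hx⟩
  have hnd1 : ([t] : List String).Nodup := List.nodup_singleton t
  have hbfsU := pvBfsLoop_spec (ce.foldl (fun d e => pvAddEdge d e.1 e.2.2)
      (fe.foldl (fun d e => pvAddEdge d e.1 e.2)
        ((PySem.Dict.empty, PySem.Dict.empty) :
          PySem.Dict String (PySem.Set String) × PySem.Dict String (PySem.Set String)))).1 md.toNat [t] [t] hnd1
    (fun x hx => hx) (fun u hu hnu _ _ => absurd hu hnu)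
  have hbfsD := pvBfsLoop_spec (ce.foldl (fun d e => pvAddEdge d e.1 e.2.2)
      (fe.foldl (fun d e => pvAddEdge d e.1 e.2)
        ((PySem.Dict.empty, PySem.Dict.empty) :
          PySem.Dict String (PySem.Set String) × PySem.Dict String (PySem.Set String)))).2 md.toNat [t] [t] hnd1
    (fun x hx => hx) (fun u hu hnu _ _ => absurd hu hnu)
  have hrelU := pvRelaxLoop_spec ((fe ++ ce.map (fun e => (e.1, e.2.2))).map (fun e => (e.2, e.1))) md.toNat [t] hnd1
  have hrelD := pvRelaxLoop_spec (fe ++ ce.map (fun e => (e.1, e.2.2))) md.toNat [t] hnd1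
  have hnbU : ∀ u y, y ∈ (ce.foldl (fun d e => pvAddEdge d e.1 e.2.2)
      (fe.foldl (fun d e => pvAddEdge d e.1 e.2)
        ((PySem.Dict.empty, PySem.Dict.empty) :
          PySem.Dict String (PySem.Set String) × PySem.Dict String (PySem.Set String)))).1.getD u PySem.Set.empty ↔
      (u, y) ∈ (fe ++ ce.map (fun e => (e.1, e.2.2))).map (fun e => (e.2, e.1)) := by
    intro u y
    rw [hA1 u y]
    constructor
    · intro h
      exact List.mem_map.2 ⟨(y, u), h, rfl⟩
    · intro h
      obtain ⟨e, he, heq⟩ := List.mem_map.1 h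
      have h1 := congrArg Prod.fst heq
      have h2 := congrArg Prod.snd heq
      simp only [] at h1 h2
      have hyu : (y, u) = e := by rw [← h1, ← h2]
      rw [hyu]
      exact he
  have hU : ∀ x, x ∈ pvBfsLoop (ce.foldl (fun d e => pvAddEdge d e.1 e.2.2)
      (fe.foldl (fun d e => pvAddEdge d e.1 e.2)
        ((PySem.Dict.empty, PySem.Dict.empty) :
          PySem.Dict String (PySem.Set String) × PySem.Dict String (PySem.Set String)))).1 md.toNat [t] [t] ↔
      x ∈ pvRelaxLoop ((fe ++ ce.map (fun e => (e.1, e.2.2))).map (fun e => (e.2, e.1))) md.toNat [t] :=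
    fun x => (hbfsU.2 x).trans
      ((pvStep_iter_congr hnbU (fun _ => Iff.rfl) md.toNat x).trans ((hrelU.2 x).symm))
  have hD : ∀ x, x ∈ pvBfsLoop (ce.foldl (fun d e => pvAddEdge d e.1 e.2.2)
      (fe.foldl (fun d e => pvAddEdge d e.1 e.2)
        ((PySem.Dict.empty, PySem.Dict.empty) :
          PySem.Dict String (PySem.Set String) × PySem.Dict String (PySem.Set String)))).2 md.toNat [t] [t] ↔
      x ∈ pvRelaxLoop (fe ++ ce.map (fun e => (e.1, e.2.2))) md.toNat [t] :=
    fun x => (hbfsD.2 x).trans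
      ((pvStep_iter_congr hA2 (fun _ => Iff.rfl) md.toNat x).trans ((hrelD.2 x).symm))
  have hup : PySem.List.sorted (PySem.Set.diff (pvBfsLoop (ce.foldl (fun d e => pvAddEdge d e.1 e.2.2)
      (fe.foldl (fun d e => pvAddEdge d e.1 e.2)
        ((PySem.Dict.empty, PySem.Dict.empty) :
          PySem.Dict String (PySem.Set String) × PySem.Dict String (PySem.Set String)))).1 md.toNat [t] [t]) [t]) (fun x => x) false
      = PySem.List.sorted (PySem.Set.diff (pvRelaxLoop ((fe ++ ce.map (fun e => (e.1, e.2.2))).map (fun e => (e.2, e.1))) md.toNat [t]) [t]) (fun x => x) false :=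
    PySem.List.sorted_eq_sorted_of_perm _ _ _ (fun a b h => h)
      ((List.perm_ext_iff_of_nodup (PySem.Set.nodup_diff _ _ hbfsU.1) (PySem.Set.nodup_diff _ _ hrelU.1)).2
        (fun a => by rw [PySem.Set.mem_diff, PySem.Set.mem_diff, hU a]))
  have hdown : PySem.List.sorted (PySem.Set.diff (pvBfsLoop (ce.foldl (fun d e => pvAddEdge d e.1 e.2.2)
      (fe.foldl (fun d e => pvAddEdge d e.1 e.2)
        ((PySem.Dict.empty, PySem.Dict.empty) :
          PySem.Dict String (PySem.Set String) × PySem.Dict String (PySem.Set String)))).2 md.toNat [t] [t]) [t]) (fun x => x) false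
      = PySem.List.sorted (PySem.Set.diff (pvRelaxLoop (fe ++ ce.map (fun e => (e.1, e.2.2))) md.toNat [t]) [t]) (fun x => x) false :=
    PySem.List.sorted_eq_sorted_of_perm _ _ _ (fun a b h => h)
      ((List.perm_ext_iff_of_nodup (PySem.Set.nodup_diff _ _ hbfsD.1) (PySem.Set.nodup_diff _ _ hrelD.1)).2
        (fun a => by rw [PySem.Set.mem_diff, PySem.Set.mem_diff, hD a]))
  have hof : PySem.Set.ofList [t] = [t] := rfl
  simp only [compute_impact, compute_impact_alt, pv_bfs, hof]
  rw [hup, hdown]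


-- ===== VERDICT (by name: the statement is the Claim_ definition above) =====
theorem compute_impact_spec : Claim_equal_compute_impact := by
  intro target_file file_edges call_edges max_depth _
  exact pv_main target_file file_edges call_edges max_depth
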